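-- pv_equiv track=rewrite | github.com/mjtomei/project_manager | pm_core/plan_parser.py | extract_plan_intro
-- ===== SOURCE A (Python) =====
-- def extract_plan_intro(text: str) -> str:
--     """Return everything before the first ## heading.
--
--     Skips the first line if it starts with ``# `` (the plan title).
--     """
--     lines = text.split('\n')
--     result = []
--     skipped_title = False
--     for line in lines:
--         if not skipped_title and line.startswith('# '):
--             skipped_title = True
--             continue
--         if line.startswith('## '):
--             break
--         result.append(line)
--     return '\n'.join(result).strip()
-- ===== SOURCE B (Python) =====
-- def extract_plan_intro(text: str) -> str:
--     """Return everything before the first ## heading, dropping the plan title.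
--
--     Two index searches + a slice/delete instead of one stateful loop."""
--     lines = text.split('\n')
--     cut = next((i for i, l in enumerate(lines) if l.startswith('## ')), len(lines))
--     intro = lines[:cut]
--     title = next((i for i, l in enumerate(intro) if l.startswith('# ')), None)
--     if title is not None:
--         del intro[title]
--     return '\n'.join(intro).strip()
-- ===== Notes on version B (the rewrite author's own statement) =====
-- stated objective: alternative
-- what changed: Replaced A's single stateful loop (skipped-title flag + break) with a build-then-edit pipeline: find the index of the first '## ' line, slice the intro prefix, find the index of the first '# ' line in it and delete exactly that element, then join and strip.
import Mathlib
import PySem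

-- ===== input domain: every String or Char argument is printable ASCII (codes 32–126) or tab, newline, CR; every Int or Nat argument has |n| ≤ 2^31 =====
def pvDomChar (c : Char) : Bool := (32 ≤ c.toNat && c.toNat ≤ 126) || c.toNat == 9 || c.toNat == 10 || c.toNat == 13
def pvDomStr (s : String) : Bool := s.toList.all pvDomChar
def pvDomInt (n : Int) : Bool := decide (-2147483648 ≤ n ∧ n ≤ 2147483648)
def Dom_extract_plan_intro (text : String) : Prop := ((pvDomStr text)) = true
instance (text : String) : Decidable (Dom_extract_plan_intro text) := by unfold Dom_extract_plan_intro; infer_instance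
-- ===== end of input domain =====

-- B replaces A's single stateful loop (skipped-title flag + break) with two index
-- searches (first '## ' line, first '# ' line) plus a slice and a single delete
-- (objective: alternative decomposition, same cost).

-- ===== PORT A =====
-- the for-loop of A: state = remaining lines × skipped_title flag
def pvLoopA : List String → Bool → List String
  | [], _ => []
  | l :: ls, skipped =>
    if !skipped && PySem.Str.startswith l "# " then pvLoopA ls true
    else if PySem.Str.startswith l "## " then []
    else l :: pvLoopA ls skipped

def extract_plan_intro (text : String) : String :=
  PySem.Str.strip (PySem.Str.join "\n" (pvLoopA ((PySem.Str.split? text "\n").getD []) false))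

-- ===== PORT B =====
def extract_plan_intro_alt (text : String) : String :=
  let lines := (PySem.Str.split? text "\n").getD []
  -- cut = index of first '## ' line, defaulting to len(lines)  (List.findIdx has exactly that default)
  let cut := lines.findIdx (fun l => PySem.Str.startswith l "## ")
  let intro := lines.take cut
  -- title = index of first '# ' line in the slice, if any; delete exactly that element
  let intro' := match intro.findIdx? (fun l => PySem.Str.startswith l "# ") with
    | some i => intro.eraseIdx i
    | none => intro
  PySem.Str.strip (PySem.Str.join "\n" intro')

-- ===== PRECONDITION & SPEC =====
def Spec_extract_plan_intro (text : String) (out : String) : Prop := out = extract_plan_intro_alt text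
instance (text : String) (out : String) : Decidable (Spec_extract_plan_intro text out) := by unfold Spec_extract_plan_intro; infer_instance

-- ===== CLAIM (what is proved, stated in full; the proofs are below) =====
def Claim_equal_extract_plan_intro : Prop := ∀ (text : String), Dom_extract_plan_intro text → Spec_extract_plan_intro text (extract_plan_intro text)

-- ===== LEMMAS AND PROOFS =====

-- B's delete-first-title step, as a named function (same computation as the match in the port)
def pvDel (xs : List String) : List String :=
  match xs.findIdx? (fun l => PySem.Str.startswith l "# ") with
  | some i => xs.eraseIdx i
  | none => xs

lemma pvDel_cons (x : String) (xs : List String) :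
    pvDel (x :: xs) =
      if PySem.Str.startswith x "# " then xs else x :: pvDel xs := by
  by_cases hx : PySem.Chars.startswith x.toList ['#', ' '] = true
  · simp [pvDel, List.findIdx?_cons, hx]
  · cases h : xs.findIdx? (fun l => PySem.Chars.startswith l.toList ['#', ' ']) <;>
      simp [pvDel, List.findIdx?_cons, hx, h, List.eraseIdx]

-- a line starting with '# ' does not start with '## '
lemma sw_title_not_section (s : List Char) (h : PySem.Chars.startswith s ['#', ' '] = true) :
    PySem.Chars.startswith s ['#', '#', ' '] = false := by
  rw [PySem.Chars.startswith_iff] at h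
  by_contra hc
  rw [Bool.not_eq_false, PySem.Chars.startswith_iff] at hc
  obtain ⟨t1, h1⟩ := h
  obtain ⟨t2, h2⟩ := hc
  rw [← h2] at h1
  simp at h1

-- take-to-first-hit is takeWhile of the negation
lemma take_findIdx_eq_takeWhile {α : Type} (p : α → Bool) (ls : List α) :
    ls.take (ls.findIdx p) = ls.takeWhile (fun x => !p x) := by
  induction ls with
  | nil => rfl
  | cons x xs ih =>
    by_cases hx : p x
    · simp [List.findIdx_cons, hx]
    · simp [List.findIdx_cons, hx, ih]

-- A's loop with the flag already set is takeWhile (no '## ' yet)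
lemma loopA_true (ls : List String) :
    pvLoopA ls true = ls.takeWhile (fun l => !PySem.Str.startswith l "## ") := by
  induction ls with
  | nil => rfl
  | cons l ls ih =>
    by_cases h : PySem.Chars.startswith l.toList ['#', '#', ' '] = true
    · simp [pvLoopA, h]
    · simp [pvLoopA, h, ih]

-- A's full loop = delete-first-title of the takeWhile prefix
lemma loopA_false (ls : List String) :
    pvLoopA ls false = pvDel (ls.takeWhile (fun l => !PySem.Str.startswith l "## ")) := by
  induction ls with
  | nil => rfl
  | cons l ls ih =>
    by_cases ht : PySem.Chars.startswith l.toList ['#', ' '] = true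
    · have hs := sw_title_not_section l.toList ht
      have hq : (!PySem.Str.startswith l "## ") = true := by simp [hs]
      rw [List.takeWhile_cons, if_pos hq, pvDel_cons,
        if_pos (show PySem.Str.startswith l "# " = true by simp [ht])]
      simp [pvLoopA, ht, loopA_true]
    · by_cases hs : PySem.Chars.startswith l.toList ['#', '#', ' '] = true
      · have hq : (!PySem.Str.startswith l "## ") = true → False := by simp [hs]
        rw [List.takeWhile_cons, if_neg hq]
        simp [pvLoopA, ht, hs, pvDel]
      · have hq : (!PySem.Str.startswith l "## ") = true := by simp [hs]
        rw [List.takeWhile_cons, if_pos hq, pvDel_cons,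
          if_neg (show ¬ PySem.Str.startswith l "# " = true by simp [ht])]
        simp [pvLoopA, ht, hs, ih]

-- ===== VERDICT (by name: the statement is the Claim_ definition above) =====
theorem extract_plan_intro_spec : Claim_equal_extract_plan_intro := by
  intro text _
  unfold Spec_extract_plan_intro
  simp only [extract_plan_intro, extract_plan_intro_alt]
  rw [take_findIdx_eq_takeWhile, loopA_false, pvDel]
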